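-- pv_equiv track=rewrite | github.com/shinsanja40-arch/paper-3-refree | proven_fact_system.py | _determine_stage_boundaries
-- ===== SOURCE A (Python) =====
-- from typing import List, Dict, Optional, Tuple
--
-- def _determine_stage_boundaries(total_sessions: int, num_stages: int = 4) -> List[int]:
--     sessions_per_stage = total_sessions // num_stages
--     remainder = total_sessions % num_stages
--     boundaries, current = [], 0
--     for i in range(num_stages):
--         current += sessions_per_stage + (1 if i < remainder else 0)
--         boundaries.append(current)
--     return boundaries
-- ===== SOURCE B (Python) =====
-- def _determine_stage_boundaries(total_sessions: int, num_stages: int = 4):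
--     q, r = divmod(total_sessions, num_stages)
--     return [q * (i + 1) + min(i + 1, r) for i in range(num_stages)]
-- ===== Notes on version B (the rewrite author's own statement) =====
-- stated objective: simpler
-- what changed: Replaced the running-accumulator loop by a direct closed-form per-index formula q*(i+1)+min(i+1,r) in a comprehension.
import Mathlib
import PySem

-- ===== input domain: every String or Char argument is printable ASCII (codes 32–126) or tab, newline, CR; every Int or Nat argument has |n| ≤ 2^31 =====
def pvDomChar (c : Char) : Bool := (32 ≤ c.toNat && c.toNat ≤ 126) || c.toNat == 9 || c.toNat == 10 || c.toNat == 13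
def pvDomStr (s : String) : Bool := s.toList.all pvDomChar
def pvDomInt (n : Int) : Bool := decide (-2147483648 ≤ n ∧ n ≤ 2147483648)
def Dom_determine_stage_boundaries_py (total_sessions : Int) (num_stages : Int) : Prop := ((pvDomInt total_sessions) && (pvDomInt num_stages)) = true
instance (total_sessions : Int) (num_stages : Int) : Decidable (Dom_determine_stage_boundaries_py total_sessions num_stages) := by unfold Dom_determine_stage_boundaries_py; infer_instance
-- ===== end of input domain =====

-- B replaces A's running accumulator with a direct per-index closed form (simpler decomposition).


-- ===== PORT A =====
def determine_stage_boundaries_py (total_sessions : Int) (num_stages : Int) : List Int :=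
  let sessions_per_stage := PySem.Int.floordiv total_sessions num_stages
  let remainder := PySem.Int.mod total_sessions num_stages
  let st := (PySem.List.pyRange 0 num_stages 1).foldl
    (fun (st : List Int × Int) i =>
      let current := st.2 + (sessions_per_stage + (if i < remainder then 1 else 0))
      (st.1 ++ [current], current)) ([], 0)
  st.1

-- ===== PORT B =====
def determine_stage_boundaries_py_alt (total_sessions : Int) (num_stages : Int) : List Int :=
  let q := PySem.Int.floordiv total_sessions num_stages
  let r := PySem.Int.mod total_sessions num_stages
  (PySem.List.pyRange 0 num_stages 1).map (fun i => q * (i + 1) + min (i + 1) r)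

-- ===== PRECONDITION & SPEC =====
-- Pre_ excludes only num_stages = 0, where Python A raises ZeroDivisionError.
def Pre_determine_stage_boundaries_py (total_sessions : Int) (num_stages : Int) : Prop := num_stages ≠ 0
instance (total_sessions : Int) (num_stages : Int) : Decidable (Pre_determine_stage_boundaries_py total_sessions num_stages) := by unfold Pre_determine_stage_boundaries_py; infer_instance
def pvWitness_determine_stage_boundaries_py : Int × Int := (10, 4)

def Spec_determine_stage_boundaries_py (total_sessions : Int) (num_stages : Int) (out : List Int) : Prop := out = determine_stage_boundaries_py_alt total_sessions num_stages
instance (total_sessions : Int) (num_stages : Int) (out : List Int) : Decidable (Spec_determine_stage_boundaries_py total_sessions num_stages out) := by unfold Spec_determine_stage_boundaries_py; infer_instance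

-- ===== CLAIM (what is proved, stated in full; the proofs are below) =====
def Claim_equal_determine_stage_boundaries_py : Prop := ∀ (total_sessions : Int) (num_stages : Int), Dom_determine_stage_boundaries_py total_sessions num_stages → Pre_determine_stage_boundaries_py total_sessions num_stages → Spec_determine_stage_boundaries_py total_sessions num_stages (determine_stage_boundaries_py total_sessions num_stages)

-- ===== LEMMAS AND PROOFS =====

-- Loop invariant: if the accumulator equals q*a + min a r at index a, the rest of the
-- fold produces the closed-form values for indices a..n-1.
theorem dsb_loop (q r : Int) : ∀ (k : Nat) (a n : Int), (n - a).toNat = k →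
    ∀ (acc : List Int) (c : Int), c = q * a + min a r →
    ((PySem.List.pyRange a n 1).foldl
      (fun (st : List Int × Int) i =>
        let current := st.2 + (q + (if i < r then 1 else 0))
        (st.1 ++ [current], current)) (acc, c)).1
    = acc ++ (PySem.List.pyRange a n 1).map (fun i => q * (i + 1) + min (i + 1) r) := by
  intro k
  induction k with
  | zero =>
    intro a n hk acc c hc
    rw [PySem.List.pyRange_one_eq_nil (by omega)]
    simp
  | succ k ih =>
    intro a n hk acc c hc
    have hab : a < n := by omega
    rw [PySem.List.pyRange_one_cons hab]
    simp only [List.foldl_cons, List.map_cons]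
    have hcur : c + (q + (if a < r then 1 else 0)) = q * (a + 1) + min (a + 1) r := by
      by_cases h : a < r
      · have h1 : min a r = a := by omega
        have h2 : min (a + 1) r = a + 1 := by omega
        simp [h, hc, h1, h2]; ring
      · have h1 : min a r = r := by omega
        have h2 : min (a + 1) r = r := by omega
        simp [h, hc, h1, h2]; ring
    rw [ih (a + 1) n (by omega) (acc ++ [c + (q + (if a < r then 1 else 0))]) _ hcur]
    simp [hcur]

-- ===== VERDICT (by name: the statement is the Claim_ definition above) =====
theorem determine_stage_boundaries_py_spec : Claim_equal_determine_stage_boundaries_py := by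
  intro t n _ _
  unfold Spec_determine_stage_boundaries_py determine_stage_boundaries_py determine_stage_boundaries_py_alt
  by_cases hn : 0 < n
  · have hr : 0 ≤ PySem.Int.mod t n := by
      rw [PySem.Int.mod_eq_emod_of_pos hn]; exact Int.emod_nonneg t (by omega)
    have h := dsb_loop (PySem.Int.floordiv t n) (PySem.Int.mod t n)
      (n - 0).toNat 0 n rfl [] 0 (by omega)
    simpa using h
  · rw [PySem.List.pyRange_one_eq_nil (by omega)]
    simp
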